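-- pv_equiv track=rewrite | github.com/danczar/unbound2technitium | unbound_to_technitium.py | _find_zone_for_record
-- ===== SOURCE A (Python) =====
-- def _find_zone_for_record(record_name: str, declared_zones: dict) -> str:
--     """Find the best-matching declared zone for a record, or infer one."""
--     name = record_name.rstrip(".")
--     labels = name.split(".")
--
--     for i in range(len(labels)):
--         candidate = ".".join(labels[i:])
--         if candidate in declared_zones:
--             return candidate
--
--     if len(labels) >= 2:
--         return ".".join(labels[-2:])
--     return name
-- ===== SOURCE B (Python) =====
-- def _find_zone_for_record(record_name: str, declared_zones: dict) -> str:
--     """Find the best-matching declared zone for a record, or infer one."""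
--     name = record_name.rstrip(".")
--     labels = name.split(".")
--
--     best = None
--     suffix = None
--     for label in reversed(labels):
--         suffix = label if suffix is None else label + "." + suffix
--         if suffix in declared_zones:
--             best = suffix
--
--     if best is not None:
--         return best
--     if len(labels) >= 2:
--         return ".".join(labels[-2:])
--     return name
-- ===== Notes on version B (the rewrite author's own statement) =====
-- stated objective: alternative
-- what changed: B builds each candidate suffix incrementally in one right-to-left scan (prepending a label per step) and keeps the last, i.e. longest, match, instead of A's re-joining labels[i:] from scratch for each start index and returning on the first hit.
import Mathlib
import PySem

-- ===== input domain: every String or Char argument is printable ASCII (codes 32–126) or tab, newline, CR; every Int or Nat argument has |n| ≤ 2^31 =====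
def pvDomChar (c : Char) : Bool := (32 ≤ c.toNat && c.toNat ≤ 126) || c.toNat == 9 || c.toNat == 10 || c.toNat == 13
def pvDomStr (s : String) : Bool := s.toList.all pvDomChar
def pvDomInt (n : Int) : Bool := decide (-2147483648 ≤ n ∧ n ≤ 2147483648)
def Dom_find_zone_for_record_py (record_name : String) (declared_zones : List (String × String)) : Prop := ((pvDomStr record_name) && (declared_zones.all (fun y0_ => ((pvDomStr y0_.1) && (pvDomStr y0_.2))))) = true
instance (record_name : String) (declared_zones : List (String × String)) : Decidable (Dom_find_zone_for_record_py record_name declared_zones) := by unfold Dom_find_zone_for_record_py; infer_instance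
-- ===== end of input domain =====

-- B changes the decomposition: one right-to-left scan building the suffix incrementally and
-- keeping the longest match, instead of re-joining labels[i:] per start index; same cost.

-- ===== PORT A =====

-- record_name.rstrip(".")  — hand port (PySem has no rstrip-with-chars): drop trailing '.'; exact.
def pvRstripDot (cs : List Char) : List Char :=
  (cs.reverse.dropWhile (fun c => c == '.')).reverse

-- the 'for i in range(len(labels))' loop with its early return, as first-some over i
def pvLoopA (labels : List (List Char)) (declared_zones : List (String × String)) :
    Option (List Char) :=
  (List.range labels.length).findSome? (fun i =>
    let candidate := PySem.Chars.join ['.'] (labels.drop i)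
    if PySem.Dict.contains (PySem.Dict.mk declared_zones) (String.ofList candidate) then some candidate else none)

def find_zone_for_record_py (record_name : String) (declared_zones : List (String × String)) : String :=
  let name := pvRstripDot record_name.toList
  let labels := PySem.Chars.splitOn name ['.']
  match pvLoopA labels declared_zones with
  | some candidate => String.ofList candidate
  | none =>
    if labels.length ≥ 2 then
      String.ofList (PySem.Chars.join ['.'] (labels.drop (labels.length - 2)))
    else String.ofList name

-- ===== PORT B =====

-- the scan state: (best, suffix), suffix = none before the first label
def pvStepB (declared_zones : List (String × String))
    (st : Option (List Char) × Option (List Char)) (label : List Char) :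
    Option (List Char) × Option (List Char) :=
  let suffix := match st.2 with
    | none => label
    | some s => label ++ '.' :: s
  (if PySem.Dict.contains (PySem.Dict.mk declared_zones) (String.ofList suffix) then some suffix else st.1,
   some suffix)

def pvScanB (labels : List (List Char)) (declared_zones : List (String × String)) :
    Option (List Char) × Option (List Char) :=
  labels.reverse.foldl (pvStepB declared_zones) (none, none)

def find_zone_for_record_py_alt (record_name : String) (declared_zones : List (String × String)) : String :=
  let name := pvRstripDot record_name.toList
  let labels := PySem.Chars.splitOn name ['.']
  match (pvScanB labels declared_zones).1 with
  | some best => String.ofList best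
  | none =>
    if labels.length ≥ 2 then
      String.ofList (PySem.Chars.join ['.'] (labels.drop (labels.length - 2)))
    else String.ofList name

-- ===== PRECONDITION & SPEC =====
def Spec_find_zone_for_record_py (record_name : String) (declared_zones : List (String × String)) (out : String) : Prop := out = find_zone_for_record_py_alt record_name declared_zones
instance (record_name : String) (declared_zones : List (String × String)) (out : String) : Decidable (Spec_find_zone_for_record_py record_name declared_zones out) := by unfold Spec_find_zone_for_record_py; infer_instance

-- ===== CLAIM (what is proved, stated in full; the proofs are below) =====
def Claim_equal_find_zone_for_record_py : Prop := ∀ (record_name : String) (declared_zones : List (String × String)), Dom_find_zone_for_record_py record_name declared_zones → Spec_find_zone_for_record_py record_name declared_zones (find_zone_for_record_py record_name declared_zones)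

-- ===== LEMMAS AND PROOFS =====

-- A's loop as a structural recursion on the label list
theorem pvLoopA_nil (dz : List (String × String)) : pvLoopA [] dz = none := by simp [pvLoopA]

theorem pvLoopA_cons (l : List Char) (rest : List (List Char)) (dz : List (String × String)) :
    pvLoopA (l :: rest) dz =
      (let c := PySem.Chars.join ['.'] (l :: rest)
       if PySem.Dict.contains (PySem.Dict.mk dz) (String.ofList c) then some c else pvLoopA rest dz) := by
  unfold pvLoopA
  simp only [List.length_cons, List.range_succ_eq_map, List.findSome?_cons, List.drop_zero]
  cases h : (dz.any fun p => p.1 == String.ofList (PySem.Chars.join ['.'] (l :: rest))) <;>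
    simp [h, List.findSome?_map, Function.comp_def, List.drop_succ_cons]
  rfl

-- joint invariant: B's scan tracks A's loop result and the full join
theorem pvScanB_eq (labels : List (List Char)) (dz : List (String × String)) :
    pvScanB labels dz =
      (pvLoopA labels dz,
       match labels with
       | [] => none
       | _ :: _ => some (PySem.Chars.join ['.'] labels)) := by
  induction labels with
  | nil => simp [pvScanB, pvLoopA_nil]
  | cons l rest ih =>
    have : pvScanB (l :: rest) dz = pvStepB dz (pvScanB rest dz) l := by
      unfold pvScanB
      simp [List.foldl_append]
    rw [this, ih, pvLoopA_cons]
    cases rest with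
    | nil =>
      simp only [pvStepB, pvLoopA_nil]
      rw [PySem.Chars.join_singleton]
    | cons r rs =>
      rw [pvLoopA_cons, PySem.Chars.join_cons_cons]
      simp only [pvStepB, List.append_assoc, List.singleton_append]

-- ===== VERDICT (by name: the statement is the Claim_ definition above) =====
theorem find_zone_for_record_py_spec : Claim_equal_find_zone_for_record_py := by
  intro record_name declared_zones _
  unfold Spec_find_zone_for_record_py find_zone_for_record_py find_zone_for_record_py_alt
  simp only [pvScanB_eq]
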